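-- pv_equiv track=rewrite | github.com/dudberoll/dictionary-classification | graph.py | format_algo_graph_
-- ===== SOURCE A (Python) =====
-- def format_algo_graph_(edge_weights):
--     """
--     Форматирует граф для алгоритма
--
--     Args:
--         edge_weights: Словарь, ключи - веса
--         my_graph: граф в формате словаря
--     """
--
--     all_nodes = set()
--     for edge in edge_weights.keys():
--         all_nodes.add(edge[0])
--         all_nodes.add(edge[1])
--     all_nodes = sorted(list(all_nodes))
--
--     my_graph = {}
--     for node_label in all_nodes:
--         my_graph[node_label] = set()
--
--     # заполняем граф вершинами
--     my_graph = {}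
--     for node_label in all_nodes:
--         my_graph[node_label] = set()
--
--     # заполняем граф ребрами
--     for (node1_label, node2_label), weight in edge_weights.items():
--         my_graph[node1_label].add(node2_label)
--         my_graph[node2_label].add(node1_label) # в две стороны ребра
--
--     return my_graph
-- ===== SOURCE B (Python) =====
-- def format_algo_graph_(edge_weights):
--     # Per-node view: each node's neighbourhood is computed independently by one
--     # comprehension over the edge list; no shared adjacency structure is built.
--     edges = list(edge_weights)
--     nodes = sorted({n for e in edges for n in e})
--     return {n: {v if u == n else u for u, v in edges if u == n or v == n}
--             for n in nodes}
-- ===== Notes on version B (the rewrite author's own statement) =====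
-- stated objective: alternative
-- what changed: B builds no adjacency dict at all: instead of A's collect/init/fill passes that mutate shared per-node sets edge by edge, B computes each sorted node's neighbourhood independently by a filter-map comprehension over the edge list.
import Mathlib
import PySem

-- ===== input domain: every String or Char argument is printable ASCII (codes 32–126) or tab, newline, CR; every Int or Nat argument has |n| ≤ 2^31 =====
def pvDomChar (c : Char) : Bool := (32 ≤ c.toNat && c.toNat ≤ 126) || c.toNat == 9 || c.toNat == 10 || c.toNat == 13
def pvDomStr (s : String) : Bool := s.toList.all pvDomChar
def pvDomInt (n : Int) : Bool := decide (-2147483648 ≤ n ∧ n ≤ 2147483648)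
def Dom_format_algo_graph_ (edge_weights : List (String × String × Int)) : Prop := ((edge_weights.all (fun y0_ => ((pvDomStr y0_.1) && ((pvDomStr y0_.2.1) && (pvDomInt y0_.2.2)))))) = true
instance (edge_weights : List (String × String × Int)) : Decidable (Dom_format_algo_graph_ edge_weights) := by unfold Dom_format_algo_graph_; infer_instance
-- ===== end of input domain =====

-- B drops A's incremental adjacency dict entirely and computes each node's neighbour
-- set independently by one comprehension over the edges: an alternative decomposition.
-- Input reading (both ports): edge_weights is a Python dict keyed by the (node1, node2) pair,
-- so its keys() iterate the DISTINCT pairs in first-occurrence order =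
-- PySem.List.dedup of the pair list; the weights are never used by either program.

-- ===== PORT A =====
-- A: collect all nodes into a set, sort them, initialise my_graph twice with empty sets,
-- then fill both directions of every edge.  my_graph[n].add(m) is ported as
-- Dict.modify n ∅ (·.add m); this is exact here because every node label occurring in an
-- edge was inserted by the initialisation loop, so the lookup can never raise KeyError.
def format_algo_graph_ (edge_weights : List (String × String × Int)) : List (String × List String) :=
  let edges : List (String × String) := PySem.List.dedup (edge_weights.map (fun y => (y.1, y.2.1)))
  let all_nodes : PySem.Set String :=
    edges.foldl (fun s e => PySem.Set.add (PySem.Set.add s e.1) e.2) PySem.Set.empty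
  let all_nodes := PySem.List.sorted all_nodes (fun x => x)
  let _g0 : PySem.Dict String (PySem.Set String) :=
    all_nodes.foldl (fun g n => g.insert n PySem.Set.empty) PySem.Dict.empty
  let g1 : PySem.Dict String (PySem.Set String) :=
    all_nodes.foldl (fun g n => g.insert n PySem.Set.empty) PySem.Dict.empty
  let g2 := edges.foldl (fun g e =>
    (PySem.Dict.modify g e.1 PySem.Set.empty (fun s => PySem.Set.add s e.2)).modify
      e.2 PySem.Set.empty (fun s => PySem.Set.add s e.1)) g1
  g2.items

-- ===== PORT B =====
-- B: edges = list(edge_weights); nodes = sorted({n for e in edges for n in e});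
-- then for each node n a set comprehension {v if u == n else u for u, v in edges
-- if u == n or v == n}, ported as Set.ofList of the filtered-mapped edge list
-- (insertion-order dedup = Python set construction).
def format_algo_graph__alt (edge_weights : List (String × String × Int)) : List (String × List String) :=
  let edges : List (String × String) := PySem.List.dedup (edge_weights.map (fun y => (y.1, y.2.1)))
  let nodes : PySem.Set String := PySem.Set.ofList (edges.flatMap (fun e => [e.1, e.2]))
  let nodes := PySem.List.sorted nodes (fun x => x)
  nodes.map (fun n => (n, PySem.Set.ofList
    ((edges.filter (fun e => e.1 == n || e.2 == n)).map
      (fun e => if e.1 == n then e.2 else e.1))))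

-- ===== PRECONDITION & SPEC =====
def Spec_format_algo_graph_ (edge_weights : List (String × String × Int)) (out : List (String × List String)) : Prop := out = format_algo_graph__alt edge_weights
instance (edge_weights : List (String × String × Int)) (out : List (String × List String)) : Decidable (Spec_format_algo_graph_ edge_weights out) := by unfold Spec_format_algo_graph_; infer_instance

-- ===== CLAIM (what is proved, stated in full; the proofs are below) =====
def Claim_equal_format_algo_graph_ : Prop := ∀ (edge_weights : List (String × String × Int)), Dom_format_algo_graph_ edge_weights → Spec_format_algo_graph_ edge_weights (format_algo_graph_ edge_weights)

-- ===== LEMMAS AND PROOFS =====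

-- keys of a single modify: append the key if it is new
theorem pv_keys_modify_add (a : PySem.Dict String (PySem.Set String)) (k : String)
    (f : PySem.Set String → PySem.Set String) :
    (a.modify k PySem.Set.empty f).keys = PySem.Set.add a.keys k := by
  rw [PySem.Dict.keys_modify]
  by_cases h : k ∈ a.keys
  · rw [PySem.Dict.keys_insert_of_contains _ _ ((PySem.Dict.contains_iff_mem_keys _ _).mpr h),
      PySem.Set.add_of_mem h]
  · have hc : a.contains k = false := by
      simpa using fun hc => h ((PySem.Dict.contains_iff_mem_keys _ _).mp hc)
    rw [PySem.Dict.keys_insert_of_not_contains _ _ hc, PySem.Set.add_of_not_mem h]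

-- A's per-edge fill step as a dict transformation
def pvStep (a : PySem.Dict String (PySem.Set String)) (e : String × String) :
    PySem.Dict String (PySem.Set String) :=
  (PySem.Dict.modify a e.1 PySem.Set.empty (fun s => PySem.Set.add s e.2)).modify
    e.2 PySem.Set.empty (fun s => PySem.Set.add s e.1)

-- B's per-node comprehension list (before set-dedup)
def pvComp (n : String) (l : List (String × String)) : List String :=
  (l.filter (fun e => e.1 == n || e.2 == n)).map (fun e => if e.1 == n then e.2 else e.1)

-- keys of A's fill fold = node-collection fold on the keys
theorem pv_keys_fill (l : List (String × String)) (a : PySem.Dict String (PySem.Set String)) :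
    (l.foldl pvStep a).keys =
      l.foldl (fun s e => PySem.Set.add (PySem.Set.add s e.1) e.2) a.keys := by
  induction l generalizing a with
  | nil => rfl
  | cons e t ih =>
    simp only [List.foldl_cons]
    rw [ih]
    congr 1
    show ((PySem.Dict.modify a e.1 PySem.Set.empty (fun s => PySem.Set.add s e.2)).modify
      e.2 PySem.Set.empty (fun s => PySem.Set.add s e.1)).keys = _
    rw [pv_keys_modify_add, pv_keys_modify_add]

-- the value a single fill step leaves at key n = its comprehension contribution
theorem pv_step_getD (g : PySem.Dict String (PySem.Set String)) (u v n : String) :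
    (pvStep g (u, v)).getD n PySem.Set.empty =
      PySem.Set.update (g.getD n PySem.Set.empty)
        (if u == n || v == n then [if u == n then v else u] else []) := by
  unfold pvStep
  by_cases h2 : n = v
  · subst h2
    rw [PySem.Dict.getD_modify_self]
    by_cases h1 : n = u
    · subst h1
      rw [PySem.Dict.getD_modify_self]
      have hm : n ∈ PySem.Set.add (g.getD n PySem.Set.empty) n := by
        rw [PySem.Set.mem_add]; right; rfl
      rw [PySem.Set.add_of_mem hm]
      simp [PySem.Set.update]
    · rw [PySem.Dict.getD_modify_of_ne _ _ _ h1]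
      have hu : (u == n) = false := beq_eq_false_iff_ne.mpr (Ne.symm h1)
      simp [hu, PySem.Set.update]
  · rw [PySem.Dict.getD_modify_of_ne _ _ _ h2]
    by_cases h1 : n = u
    · subst h1
      rw [PySem.Dict.getD_modify_self]
      simp [PySem.Set.update]
    · rw [PySem.Dict.getD_modify_of_ne _ _ _ h1]
      have hu : (u == n) = false := beq_eq_false_iff_ne.mpr (Ne.symm h1)
      have hv : (v == n) = false := beq_eq_false_iff_ne.mpr (Ne.symm h2)
      simp [hu, hv, PySem.Set.update]

-- the value A's fill fold leaves at key n = the start value updated with B's comprehension list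
theorem pv_getD_fill_comp (l : List (String × String))
    (g : PySem.Dict String (PySem.Set String)) (n : String) :
    (l.foldl pvStep g).getD n PySem.Set.empty =
      PySem.Set.update (g.getD n PySem.Set.empty) (pvComp n l) := by
  induction l generalizing g with
  | nil => rfl
  | cons e t ih =>
    obtain ⟨u, v⟩ := e
    simp only [List.foldl_cons]
    rw [ih]
    have hcomp : pvComp n ((u, v) :: t) =
        (if u == n || v == n then [if u == n then v else u] else []) ++ pvComp n t := by
      simp only [pvComp, List.filter_cons]
      by_cases h : (u == n || v == n) = true
      · simp [h]
      · simp [h]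
    have hupd : ∀ (s : PySem.Set String) (xs ys : List String),
        PySem.Set.update s (xs ++ ys) = PySem.Set.update (PySem.Set.update s xs) ys := by
      intro s xs ys; simp [PySem.Set.update, List.foldl_append]
    rw [hcomp, hupd, pv_step_getD]

-- the node-collection fold is Set.update with the flattened pair list
theorem pv_nodes_eq_update (l : List (String × String)) (s : PySem.Set String) :
    l.foldl (fun s e => PySem.Set.add (PySem.Set.add s e.1) e.2) s =
      PySem.Set.update s (l.flatMap (fun e => [e.1, e.2])) := by
  induction l generalizing s with
  | nil => rfl
  | cons e t ih => simp [List.foldl_cons, ih, PySem.Set.update]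

-- a fold of inserts of ∅ keeps every getD-with-∅ at ∅
theorem pv_getD_init (ns : List String) (g : PySem.Dict String (PySem.Set String))
    (h : ∀ k, g.getD k PySem.Set.empty = PySem.Set.empty) :
    ∀ k, (ns.foldl (fun g n => g.insert n PySem.Set.empty) g).getD k PySem.Set.empty
      = PySem.Set.empty := by
  induction ns generalizing g with
  | nil => exact h
  | cons n t ih =>
    simp only [List.foldl_cons]
    refine ih _ (fun k => ?_)
    by_cases hk : k = n
    · subst hk; rw [PySem.Dict.getD_insert_self]
    · rw [PySem.Dict.getD_insert_of_ne _ _ _ hk]; exact h k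

-- ===== VERDICT (by name: the statement is the Claim_ definition above) =====
theorem format_algo_graph__spec : Claim_equal_format_algo_graph_ := by
  intro ew _
  show format_algo_graph_ ew = format_algo_graph__alt ew
  unfold format_algo_graph_ format_algo_graph__alt
  set l : List (String × String) := PySem.List.dedup (ew.map (fun y => (y.1, y.2.1))) with hl
  set nodesSet : PySem.Set String :=
    l.foldl (fun s e => PySem.Set.add (PySem.Set.add s e.1) e.2) PySem.Set.empty with hnodes
  have hnodes_ofList : nodesSet = PySem.Set.ofList (l.flatMap (fun e => [e.1, e.2])) := by
    rw [hnodes, pv_nodes_eq_update]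
    show PySem.Set.empty.update _ = _
    rw [PySem.Set.update_empty]
  have hnodes_nodup : nodesSet.Nodup := by
    rw [hnodes_ofList]; exact PySem.Set.nodup_ofList _
  have hmem_nodes : ∀ e ∈ l, e.1 ∈ nodesSet ∧ e.2 ∈ nodesSet := by
    intro e he
    rw [hnodes_ofList]
    refine ⟨(PySem.Set.mem_ofList _ _).mpr ?_, (PySem.Set.mem_ofList _ _).mpr ?_⟩ <;>
      · rw [List.mem_flatMap]; exact ⟨e, he, by simp⟩
  set sn := PySem.List.sorted nodesSet (fun x => x) with hsn
  have hsn_nodup : sn.Nodup :=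
    (PySem.List.sorted_perm nodesSet (fun x => x) false).nodup_iff.mpr hnodes_nodup
  have hmem_sn : ∀ e ∈ l, e.1 ∈ sn ∧ e.2 ∈ sn := by
    intro e he
    have := hmem_nodes e he
    exact ⟨(PySem.List.mem_sorted _ _ _ _).mpr this.1, (PySem.List.mem_sorted _ _ _ _).mpr this.2⟩
  set g1 : PySem.Dict String (PySem.Set String) :=
    sn.foldl (fun g n => g.insert n PySem.Set.empty) PySem.Dict.empty with hg1
  have hg1_keys : g1.keys = sn := by
    rw [hg1, PySem.Dict.keys_foldl_insert, PySem.Dict.keys_empty]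
    show PySem.Set.empty.update _ = _
    rw [PySem.Set.update_empty, PySem.Set.ofList_eq_self_of_nodup _ hsn_nodup]
  have hsn_ofList : PySem.List.sorted (PySem.Set.ofList (l.flatMap (fun e => [e.1, e.2]))) (fun x => x) = sn := by
    rw [hsn, hnodes_ofList]
  show (l.foldl pvStep g1).items =
    (PySem.List.sorted (PySem.Set.ofList (l.flatMap (fun e => [e.1, e.2]))) (fun x => x)).map
      (fun n => (n, PySem.Set.ofList (pvComp n l)))
  rw [hsn_ofList]
  have hA_keys : (l.foldl pvStep g1).keys = sn := by
    rw [pv_keys_fill, hg1_keys]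
    -- adding node labels already present in sn changes nothing
    have : ∀ (m : List (String × String)), (∀ e ∈ m, e.1 ∈ sn ∧ e.2 ∈ sn) →
        m.foldl (fun s e => PySem.Set.add (PySem.Set.add s e.1) e.2) sn = sn := by
      intro m
      induction m with
      | nil => intro _; rfl
      | cons e t ih =>
        intro h
        have he := h e (by simp)
        simp only [List.foldl_cons, PySem.Set.add_of_mem he.1, PySem.Set.add_of_mem he.2]
        exact ih (fun x hx => h x (by simp [hx]))
    exact this l hmem_sn
  have hg1_zero : ∀ k, g1.getD k PySem.Set.empty = PySem.Set.empty := by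
    rw [hg1]
    exact pv_getD_init sn PySem.Dict.empty (fun k => PySem.Dict.getD_empty _ _)
  rw [PySem.Dict.items_eq_map_keys (l.foldl pvStep g1) (hA_keys ▸ hsn_nodup) PySem.Set.empty,
    hA_keys]
  refine List.map_congr_left (fun k _ => ?_)
  rw [pv_getD_fill_comp, hg1_zero k]
  show (_, PySem.Set.empty.update _) = _
  rw [PySem.Set.update_empty]
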